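-- pv_equiv track=rewrite | github.com/paiml/depyler | examples/hard_functional_patterns.py | group_by_mod
-- ===== SOURCE A (Python) =====
-- def group_by_mod(vals: list[int], modulus: int) -> dict[int, list[int]]:
--     """Group values by their remainder when divided by modulus."""
--     groups: dict[int, list[int]] = {}
--     for v in vals:
--         key: int = v % modulus
--         if key in groups:
--             groups[key].append(v)
--         else:
--             groups[key] = [v]
--     return groups
-- ===== SOURCE B (Python) =====
-- def group_by_mod(vals: list[int], modulus: int) -> dict[int, list[int]]:
--     """Group values by remainder: collect distinct remainders in first-appearance
--     order, then build each group with one filtering pass per remainder."""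
--     keys: list[int] = []
--     seen: set[int] = set()
--     for v in vals:
--         k = v % modulus
--         if k not in seen:
--             seen.add(k)
--             keys.append(k)
--     return {k: [v for v in vals if v % modulus == k] for k in keys}
-- ===== Notes on version B (the rewrite author's own statement) =====
-- stated objective: alternative
-- what changed: A scatters each value into a keyed dict list in one pass; B first collects the distinct remainders in first-appearance order and then builds each group by a separate filtering pass over the whole input (keys-then-filter instead of dict scatter).
import Mathlib
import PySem

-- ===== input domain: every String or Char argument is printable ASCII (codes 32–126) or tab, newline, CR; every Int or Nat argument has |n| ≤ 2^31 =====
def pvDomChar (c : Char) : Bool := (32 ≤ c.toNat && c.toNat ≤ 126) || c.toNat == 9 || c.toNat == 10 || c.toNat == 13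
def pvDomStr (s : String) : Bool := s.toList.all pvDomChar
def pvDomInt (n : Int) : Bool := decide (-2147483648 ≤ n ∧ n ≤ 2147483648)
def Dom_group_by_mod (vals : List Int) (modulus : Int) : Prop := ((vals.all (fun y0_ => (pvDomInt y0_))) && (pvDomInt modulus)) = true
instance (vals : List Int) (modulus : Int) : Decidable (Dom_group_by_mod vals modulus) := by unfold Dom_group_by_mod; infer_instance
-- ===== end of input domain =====

-- B replaces A's one-pass dict scatter by keys-then-filter (same results, alternative decomposition; not claimed faster).

-- ===== PORT A =====
def group_by_mod (vals : List Int) (modulus : Int) : List (Int × List Int) :=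
  (vals.foldl (fun groups v =>
      let key := PySem.Int.mod v modulus
      if groups.contains key then
        groups.modify key [] (fun l => l ++ [v])      -- groups[key].append(v)
      else
        groups.insert key [v])
    PySem.Dict.empty).items

-- ===== PORT B =====
def group_by_mod_alt (vals : List Int) (modulus : Int) : List (Int × List Int) :=
  let keys : PySem.Set Int := PySem.Set.ofList (vals.map (fun v => PySem.Int.mod v modulus))
  keys.map (fun k => (k, vals.filter (fun v => PySem.Int.mod v modulus == k)))

-- ===== PRECONDITION & SPEC =====
-- Pre_ excludes exactly the inputs where Python A raises ZeroDivisionError: modulus = 0 with a nonempty list.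
def Pre_group_by_mod (vals : List Int) (modulus : Int) : Prop := vals = [] ∨ modulus ≠ 0
instance (vals : List Int) (modulus : Int) : Decidable (Pre_group_by_mod vals modulus) := by unfold Pre_group_by_mod; infer_instance
def pvWitness_group_by_mod : List Int × Int := ([5, 1, -7, 3, 8, 2], 3)

def Spec_group_by_mod (vals : List Int) (modulus : Int) (out : List (Int × List Int)) : Prop := out = group_by_mod_alt vals modulus
instance (vals : List Int) (modulus : Int) (out : List (Int × List Int)) : Decidable (Spec_group_by_mod vals modulus out) := by unfold Spec_group_by_mod; infer_instance

-- ===== CLAIM (what is proved, stated in full; the proofs are below) =====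
def Claim_equal_group_by_mod : Prop := ∀ (vals : List Int) (modulus : Int), Dom_group_by_mod vals modulus → Pre_group_by_mod vals modulus → Spec_group_by_mod vals modulus (group_by_mod vals modulus)

-- ===== LEMMAS AND PROOFS =====

-- A's branch (append-or-create) is exactly Dict.modify.
theorem step_eq_modify (d : PySem.Dict Int (List Int)) (k : Int) (v : Int) :
    (if d.contains k then d.modify k [] (fun l => l ++ [v]) else d.insert k [v])
      = d.modify k [] (fun l => l ++ [v]) := by
  by_cases h : d.contains k = true
  · simp [h]
  · simp at h
    simp [h, PySem.Dict.modify, PySem.Dict.getD_of_not_contains _ _ h]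

theorem group_by_mod_eq_modify_fold (vals : List Int) (modulus : Int) :
    group_by_mod vals modulus =
      ((vals.map (fun v => (PySem.Int.mod v modulus, v))).foldl
        (fun d p => d.modify p.1 [] (fun l => l ++ [p.2])) PySem.Dict.empty).items := by
  unfold group_by_mod
  rw [List.foldl_map]
  congr 1
  apply PySem.List.foldl_congr_mem
  intro acc x _
  exact step_eq_modify acc (PySem.Int.mod x modulus) x

-- ===== VERDICT (by name: the statement is the Claim_ definition above) =====
theorem group_by_mod_spec : Claim_equal_group_by_mod := by
  intro vals modulus _ _
  unfold Spec_group_by_mod group_by_mod_alt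
  have hfold :
      ((vals.map (fun v => (PySem.Int.mod v modulus, v))).foldl
          (fun d p => d.modify p.1 [] (fun l => l ++ [p.2])) PySem.Dict.empty)
        = vals.foldl (fun d v => d.modify (PySem.Int.mod v modulus) [] (fun l => l ++ [v]))
            PySem.Dict.empty := by
    rw [List.foldl_map]
  have hnd : (vals.foldl (fun d v => d.modify (PySem.Int.mod v modulus) [] (fun l => l ++ [v]))
      PySem.Dict.empty).keys.Nodup :=
    PySem.Dict.nodup_keys_foldl_modify_key vals (fun v => PySem.Int.mod v modulus) []
      (fun d v l => l ++ [v]) PySem.Dict.empty (by simp)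
  have hkeys : (vals.foldl (fun d v => d.modify (PySem.Int.mod v modulus) [] (fun l => l ++ [v]))
      PySem.Dict.empty).keys = PySem.Set.ofList (vals.map (fun v => PySem.Int.mod v modulus)) := by
    rw [PySem.Dict.keys_foldl_modify_key]
    simp [PySem.Set.update, PySem.Set.ofList_eq_foldl]
  rw [group_by_mod_eq_modify_fold, hfold,
    PySem.Dict.items_eq_map_keys _ hnd [], hkeys]
  apply List.map_congr_left
  intro k _
  have hget : (vals.foldl (fun d v => d.modify (PySem.Int.mod v modulus) [] (fun l => l ++ [v]))
      PySem.Dict.empty).getD k [] =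
      ((vals.map (fun v => (PySem.Int.mod v modulus, v))).filter
        (fun p => p.1 == k)).map (fun p => p.2) := by
    rw [← hfold, PySem.Dict.getD_foldl_modify_append]
    simp
  rw [hget, List.filter_map, List.map_map]
  simp [Function.comp_def]
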